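-- pv_equiv track=rewrite | github.com/catapult-project/catapult | dashboard/dashboard/bisect_stats.py | _GetTotalBisectRunSeries
-- ===== SOURCE A (Python) =====
-- _NUM_POINTS_TO_DISPLAY = 52
--
-- def _GetTotalBisectRunSeries(series_map):
--   """Sums up failed and completed bisect run series.
--
--   Args:
--     series_map: Dictionary of series names to list of data series.
--
--   Returns:
--     A list of data series.
--   """
--   cropped_series_list = []
--   for key in series_map:
--     series = series_map[key]
--     cropped_series_list.append(series[len(series) - _NUM_POINTS_TO_DISPLAY:])
--
--   # Sum up series.
--   series_map = {}
--   for series in cropped_series_list: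
--     for x_value, y_value in series:
--       if x_value not in series_map:
--         series_map[x_value] = y_value
--       else:
--         series_map[x_value] += y_value
--
--   result_list = []
--   for key in sorted(series_map):
--     result_list.append([key, series_map[key]])
--   return result_list
-- ===== SOURCE B (Python) =====
-- _NUM_POINTS_TO_DISPLAY = 52
--
-- def _GetTotalBisectRunSeries(series_map):
--   """Sums up failed and completed bisect run series."""
--   points = []
--   for series in series_map.values():
--     for x_value, y_value in series[len(series) - _NUM_POINTS_TO_DISPLAY:]:
--       points.append((x_value, y_value))
--   x_values = sorted({x for x, _ in points})
--   return [[x, sum(y for px, y in points if px == x)] for x in x_values]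
-- ===== Notes on version B (the rewrite author's own statement) =====
-- stated objective: simpler
-- what changed: A aggregates with a dict membership-test/update loop and then sorts the dict keys; B flattens the cropped points into one pair list, sorts the set of x-values, and sums the matching y-values per x with a filtered-sum comprehension.
import Mathlib
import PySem

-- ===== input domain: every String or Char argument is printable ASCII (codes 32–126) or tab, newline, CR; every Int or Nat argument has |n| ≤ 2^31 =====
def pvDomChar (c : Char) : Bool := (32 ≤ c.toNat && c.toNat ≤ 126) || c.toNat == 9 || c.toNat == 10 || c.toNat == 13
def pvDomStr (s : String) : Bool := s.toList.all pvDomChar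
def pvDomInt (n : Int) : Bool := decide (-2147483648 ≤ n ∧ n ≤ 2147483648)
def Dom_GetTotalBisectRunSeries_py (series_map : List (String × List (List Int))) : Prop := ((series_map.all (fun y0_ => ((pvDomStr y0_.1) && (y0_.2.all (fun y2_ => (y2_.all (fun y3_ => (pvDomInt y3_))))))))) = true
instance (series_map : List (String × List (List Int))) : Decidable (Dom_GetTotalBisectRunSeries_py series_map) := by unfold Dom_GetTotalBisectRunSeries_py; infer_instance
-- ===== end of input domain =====

-- B replaces A's dict-membership aggregation loop by: flatten the cropped points once,
-- take the sorted set of x-values, and sum the matching y-values per x (simpler decomposition, not faster).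

-- ===== PORT A =====
-- literal transliteration of _GetTotalBisectRunSeries; 'for key in series_map: series = series_map[key]'
-- iterates the dict's items in insertion order (PySem.Dict.ofList series_map).items.
-- the body of A's inner loop: unpack 'x_value, y_value = point' and do the if/else dict update
def pvStepA (m : PySem.Dict Int Int) (point : List Int) : PySem.Dict Int Int :=
  match point with
  | [x, y] => if m.contains x then m.insert x (m.getD x 0 + y) else m.insert x y
  | _ => m   -- Python raises (tuple unpacking) on a point of length ≠ 2; excluded by Pre_

def GetTotalBisectRunSeries_py (series_map : List (String × List (List Int))) : List (List Int) :=
  let cropped_series_list : List (List (List Int)) :=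
    (PySem.Dict.ofList series_map).items.foldl
      (fun acc kv => acc ++ [PySem.List.slice kv.2 (some ((kv.2.length : Int) - 52)) none]) []
  let agg : PySem.Dict Int Int :=
    cropped_series_list.foldl (fun m series => series.foldl pvStepA m) PySem.Dict.empty
  (PySem.List.sorted agg.keys (fun k => k) false).foldl
    (fun acc k => acc ++ [[k, agg.getD k 0]]) []

-- ===== PORT B =====
-- literal transliteration of Source B
-- the body of B's points loop: unpack the point and append the pair
def pvStepB (acc : List (Int × Int)) (point : List Int) : List (Int × Int) :=
  match point with
  | [x, y] => acc ++ [(x, y)]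
  | _ => acc   -- Python raises (tuple unpacking) here; excluded by Pre_

def GetTotalBisectRunSeries_py_alt (series_map : List (String × List (List Int))) : List (List Int) :=
  let points : List (Int × Int) :=
    (PySem.Dict.ofList series_map).values.foldl (fun acc series =>
      (PySem.List.slice series (some ((series.length : Int) - 52)) none).foldl pvStepB acc) []
  let x_values := PySem.List.sorted (PySem.Set.ofList (points.map Prod.fst)) (fun x => x) false
  x_values.map (fun x => [x, ((points.filter (fun p => p.1 == x)).map Prod.snd).sum])

-- ===== PRECONDITION & SPEC =====
-- Pre_ excludes exactly the inputs where both Pythons raise ValueError/TypeError: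
-- some cropped point does not unpack as a pair 'x_value, y_value' (length ≠ 2).
def Pre_GetTotalBisectRunSeries_py (series_map : List (String × List (List Int))) : Prop :=
  ∀ kv ∈ (PySem.Dict.ofList series_map).items,
    ∀ p ∈ PySem.List.slice kv.2 (some ((kv.2.length : Int) - 52)) none, p.length = 2
instance (series_map : List (String × List (List Int))) : Decidable (Pre_GetTotalBisectRunSeries_py series_map) := by unfold Pre_GetTotalBisectRunSeries_py; infer_instance

def pvWitness_GetTotalBisectRunSeries_py : (List (String × List (List Int))) :=
  [("completed", [[1, 2], [3, 4]]), ("failed", [[1, 5]])]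

def Spec_GetTotalBisectRunSeries_py (series_map : List (String × List (List Int))) (out : List (List Int)) : Prop := out = GetTotalBisectRunSeries_py_alt series_map
instance (series_map : List (String × List (List Int))) (out : List (List Int)) : Decidable (Spec_GetTotalBisectRunSeries_py series_map out) := by unfold Spec_GetTotalBisectRunSeries_py; infer_instance

-- ===== CLAIM (what is proved, stated in full; the proofs are below) =====
def Claim_equal_GetTotalBisectRunSeries_py : Prop := ∀ (series_map : List (String × List (List Int))), Dom_GetTotalBisectRunSeries_py series_map → Pre_GetTotalBisectRunSeries_py series_map → Spec_GetTotalBisectRunSeries_py series_map (GetTotalBisectRunSeries_py series_map)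

-- ===== LEMMAS AND PROOFS =====

theorem pvWitness_ok :
    Dom_GetTotalBisectRunSeries_py pvWitness_GetTotalBisectRunSeries_py ∧
    Pre_GetTotalBisectRunSeries_py pvWitness_GetTotalBisectRunSeries_py := by
  constructor <;> decide

-- the same update on an (x, y) pair
def pvStepP (m : PySem.Dict Int Int) (p : Int × Int) : PySem.Dict Int Int :=
  if m.contains p.1 then m.insert p.1 (m.getD p.1 0 + p.2) else m.insert p.1 p.2

-- B's per-point pair extraction
def pvPairs (point : List Int) : List (Int × Int) :=
  match point with
  | [x, y] => [(x, y)]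
  | _ => []

theorem pvStepB_eq (acc : List (Int × Int)) (point : List Int) :
    pvStepB acc point = acc ++ pvPairs point := by
  unfold pvStepB
  match point with
  | [] => simp [pvPairs]
  | [x] => simp [pvPairs]
  | [x, y] => simp [pvPairs]
  | x :: y :: z :: t => simp [pvPairs]

-- a flat run of A's point loop equals the pair-fold over the extracted pairs
theorem pvFoldA_eq_fold_pairs (pts : List (List Int)) (h : ∀ p ∈ pts, p.length = 2)
    (m : PySem.Dict Int Int) :
    pts.foldl pvStepA m = (pts.flatMap pvPairs).foldl pvStepP m := by
  induction pts generalizing m with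
  | nil => rfl
  | cons p t ih =>
    have hp := h p (by simp)
    match p, hp with
    | [x, y], _ =>
      simp only [List.foldl_cons, List.flatMap_cons]
      rw [ih (fun q hq => h q (by simp [hq]))]
      rfl

-- the aggregation dict: keys are the distinct x-values in order, values the filtered sums
theorem pvAgg_spec (ps : List (Int × Int)) :
    (ps.foldl pvStepP PySem.Dict.empty).keys = PySem.Set.ofList (ps.map Prod.fst) ∧
    ∀ k, (ps.foldl pvStepP PySem.Dict.empty).getD k 0 =
      ((ps.filter (fun p => p.1 == k)).map Prod.snd).sum := by
  induction ps using List.reverseRecOn with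
  | nil => simp [PySem.Dict.keys_empty, PySem.Set.ofList_nil, PySem.Dict.getD_empty]
  | append_singleton t p ih =>
    obtain ⟨hk, hv⟩ := ih
    rw [List.foldl_append]
    simp only [List.foldl_cons, List.foldl_nil, List.map_append, List.map_cons, List.map_nil,
      PySem.Set.ofList_append_singleton]
    set agg := t.foldl pvStepP PySem.Dict.empty with hagg
    by_cases hc : agg.contains p.1 = true
    · have hmem : p.1 ∈ PySem.Set.ofList (t.map Prod.fst) := by
        rw [← hk]; exact (PySem.Dict.contains_iff_mem_keys agg p.1).mp hc
      constructor
      · rw [pvStepP, if_pos hc, PySem.Dict.keys_insert_of_contains agg _ hc, hk,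
          PySem.Set.add_of_mem hmem]
      · intro k
        rw [pvStepP, if_pos hc, PySem.Dict.getD_insert]
        by_cases hkp : k = p.1
        · subst hkp
          simp [List.filter_append, hv p.1]
        · simp [List.filter_append, hv k, hkp, Ne.symm hkp, beq_iff_eq]
    · have hc' : agg.contains p.1 = false := by simpa using hc
      have hmem : p.1 ∉ PySem.Set.ofList (t.map Prod.fst) := by
        rw [← hk]; intro hm
        exact hc ((PySem.Dict.contains_iff_mem_keys agg p.1).mpr hm)
      have hfil : t.filter (fun q => q.1 == p.1) = [] := by
        rw [List.filter_eq_nil_iff]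
        intro q hq hq1
        exact hmem (by
          rw [PySem.Set.mem_ofList]
          exact List.mem_map.mpr ⟨q, hq, by simpa [beq_iff_eq] using hq1⟩)
      constructor
      · rw [pvStepP, if_neg (by simp [hc']), PySem.Dict.keys_insert_of_not_contains agg _ hc', hk,
          PySem.Set.add_of_not_mem hmem]
      · intro k
        rw [pvStepP, if_neg (by simp [hc']), PySem.Dict.getD_insert]
        by_cases hkp : k = p.1
        · subst hkp
          simp [List.filter_append, hfil]
        · simp [List.filter_append, hv k, hkp, Ne.symm hkp, beq_iff_eq]

-- A's nested loop over the cropped series equals the pair-fold over the flattened pairs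
theorem pvNested (crops : List (List (List Int))) (h : ∀ s ∈ crops, ∀ p ∈ s, p.length = 2)
    (m : PySem.Dict Int Int) :
    crops.foldl (fun m s => s.foldl pvStepA m) m
      = (crops.flatMap (fun s => s.flatMap pvPairs)).foldl pvStepP m := by
  induction crops generalizing m with
  | nil => rfl
  | cons s t ih =>
    simp only [List.foldl_cons, List.flatMap_cons, List.foldl_append]
    rw [pvFoldA_eq_fold_pairs s (h s (by simp)) m, ih (fun q hq => h q (by simp [hq]))]

-- ===== VERDICT (by name: the statement is the Claim_ definition above) =====
theorem GetTotalBisectRunSeries_py_spec : Claim_equal_GetTotalBisectRunSeries_py := by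
  intro series_map _hDom hPre
  unfold Spec_GetTotalBisectRunSeries_py GetTotalBisectRunSeries_py GetTotalBisectRunSeries_py_alt
  set items := (PySem.Dict.ofList series_map).items with hitems
  have hcropA :
      items.foldl (fun acc kv => acc ++ [PySem.List.slice kv.2 (some ((kv.2.length : Int) - 52)) none]) []
        = items.map (fun kv => PySem.List.slice kv.2 (some ((kv.2.length : Int) - 52)) none) := by
    rw [PySem.List.foldl_append_singleton_eq_map]; simp
  set crops := items.map (fun kv => PySem.List.slice kv.2 (some ((kv.2.length : Int) - 52)) none)
    with hcrops
  have hlen : ∀ s ∈ crops, ∀ p ∈ s, p.length = 2 := by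
    intro s hs p hp
    rw [hcrops] at hs
    obtain ⟨kv, hkv, rfl⟩ := List.mem_map.mp hs
    exact hPre kv hkv p hp
  -- the flattened pair list both sides aggregate over
  set ps := crops.flatMap (fun s => s.flatMap pvPairs) with hps
  have hvals : (PySem.Dict.ofList series_map).values = items.map Prod.snd := rfl
  -- B's points list is ps
  have hptsB :
      (PySem.Dict.ofList series_map).values.foldl (fun acc series =>
        (PySem.List.slice series (some ((series.length : Int) - 52)) none).foldl pvStepB acc) []
      = ps := by
    have hinner : ∀ (s : List (List Int)) (acc : List (Int × Int)),
        s.foldl pvStepB acc = acc ++ s.flatMap pvPairs := by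
      intro s acc
      have hfun : pvStepB = fun acc point => acc ++ pvPairs point := by
        funext acc point; exact pvStepB_eq acc point
      rw [hfun, PySem.List.foldl_append_eq_flatMap]
    rw [hvals]
    calc (items.map Prod.snd).foldl (fun acc series =>
          (PySem.List.slice series (some ((series.length : Int) - 52)) none).foldl pvStepB acc) []
        = (items.map Prod.snd).foldl (fun acc series =>
            acc ++ (PySem.List.slice series (some ((series.length : Int) - 52)) none).flatMap pvPairs) [] := by
          apply PySem.List.foldl_congr_mem
          intro acc s _
          exact hinner _ acc
      _ = crops.foldl (fun acc s => acc ++ s.flatMap pvPairs) [] := by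
          rw [hcrops, List.foldl_map, List.foldl_map]
      _ = ps := by
          rw [PySem.List.foldl_append_eq_flatMap, hps]; rfl
  rw [hcropA, hptsB]
  simp only []
  rw [pvNested crops hlen PySem.Dict.empty, ← hps]
  obtain ⟨hk, hv⟩ := pvAgg_spec ps
  rw [PySem.List.foldl_append_singleton_eq_map, hk]
  simp only [List.nil_append]
  exact List.map_congr_left (fun k _ => by rw [hv k])
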